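-- pv_equiv track=rewrite | github.com/wsbuck/cryptopals | set1/challenge6.py | transpose_blocks
-- ===== SOURCE A (Python) =====
-- def transpose_blocks(blocks):
--     n_internal = len(blocks[0])
--     transpose = []
--     t_internal = []
--     for i in range(n_internal):
--         for b_i in blocks:
--             if i < len(b_i):
--                 t_internal.append(b_i[i])
--         transpose.append(t_internal)
--         t_internal = []
--     return transpose
-- ===== SOURCE B (Python) =====
-- def transpose_blocks(blocks):
--     n = len(blocks[0])
--     transpose = [[] for _ in range(n)]
--     for block in blocks:
--         for j, x in enumerate(block):
--             if j < n:
--                 transpose[j].append(x)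
--     return transpose
-- ===== Notes on version B (the rewrite author's own statement) =====
-- stated objective: alternative
-- what changed: B scatters in one row-major pass over the blocks, maintaining all n column accumulators simultaneously, instead of A's column-major pass that re-scans every block once per output column.
import Mathlib
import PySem

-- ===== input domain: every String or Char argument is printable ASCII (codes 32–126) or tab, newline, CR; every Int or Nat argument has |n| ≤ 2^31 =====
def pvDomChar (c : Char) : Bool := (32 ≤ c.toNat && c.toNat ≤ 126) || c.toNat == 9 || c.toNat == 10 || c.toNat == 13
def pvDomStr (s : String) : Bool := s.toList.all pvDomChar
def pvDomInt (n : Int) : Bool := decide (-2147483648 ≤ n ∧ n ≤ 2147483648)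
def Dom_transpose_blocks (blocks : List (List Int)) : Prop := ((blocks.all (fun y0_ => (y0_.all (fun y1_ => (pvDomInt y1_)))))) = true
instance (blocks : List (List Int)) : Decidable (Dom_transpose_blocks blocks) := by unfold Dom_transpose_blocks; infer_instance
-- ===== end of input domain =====

-- B builds the transpose by scattering each block's elements into all n column accumulators in one row-major pass, instead of A's per-column re-scan of the blocks.


-- ===== PORT A =====
-- n_internal = len(blocks[0]); for i in range(n_internal): inner pass over blocks collecting b_i[i] when i < len(b_i)
def transpose_blocks (blocks : List (List Int)) : List (List Int) :=
  let n_internal := ((PySem.List.pyGet? blocks 0).getD []).length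
  (List.range n_internal).foldl
    (fun transpose i =>
      let t_internal := blocks.foldl
        (fun t b_i => if i < b_i.length then t ++ [b_i.getD i 0] else t) []
      transpose ++ [t_internal])
    []

-- ===== PORT B =====
-- inner loop of B: for j, x in enumerate(block): if j < n: transpose[j].append(x)
def scatterBlock (n : Nat) (j : Nat) (b : List Int) (r : List (List Int)) : List (List Int) :=
  match b with
  | [] => r
  | x :: rest => scatterBlock n (j + 1) rest (if j < n then r.modify j (· ++ [x]) else r)

def transpose_blocks_alt (blocks : List (List Int)) : List (List Int) :=
  let n := ((PySem.List.pyGet? blocks 0).getD []).length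
  blocks.foldl (fun r block => scatterBlock n 0 block r) (List.replicate n [])

-- ===== PRECONDITION & SPEC =====
-- Pre_ excludes only the empty list, on which the Python A raises IndexError at blocks[0] (B raises there too)
def Pre_transpose_blocks (blocks : List (List Int)) : Prop := blocks ≠ []
instance (blocks : List (List Int)) : Decidable (Pre_transpose_blocks blocks) := by unfold Pre_transpose_blocks; infer_instance
def pvWitness_transpose_blocks : List (List Int) := [[1, 2], [3]]
def Spec_transpose_blocks (blocks : List (List Int)) (out : List (List Int)) : Prop := out = transpose_blocks_alt blocks
instance (blocks : List (List Int)) (out : List (List Int)) : Decidable (Spec_transpose_blocks blocks out) := by unfold Spec_transpose_blocks; infer_instance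

-- ===== CLAIM (what is proved, stated in full; the proofs are below) =====
def Claim_equal_transpose_blocks : Prop := ∀ (blocks : List (List Int)), Dom_transpose_blocks blocks → Pre_transpose_blocks blocks → Spec_transpose_blocks blocks (transpose_blocks blocks)

-- ===== LEMMAS AND PROOFS =====

-- column i of the transpose: the characterisation both ports are reduced to
def col (blocks : List (List Int)) (i : Nat) : List Int := blocks.filterMap (fun b => b[i]?)

-- A side: the inner fold over blocks is a filterMap
theorem foldl_col (blocks : List (List Int)) (i : Nat) (acc : List Int) :
    blocks.foldl (fun t b_i => if i < b_i.length then t ++ [b_i.getD i 0] else t) acc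
      = acc ++ col blocks i := by
  induction blocks generalizing acc with
  | nil => simp [col]
  | cons b bs ih =>
    simp only [List.foldl_cons]
    by_cases h : i < b.length
    · rw [if_pos h, ih]
      have hb : b[i]? = some (b.getD i 0) := by
        simp [List.getD, List.getElem?_eq_getElem h]
      simp only [col, List.filterMap_cons, hb, List.append_assoc, List.singleton_append]
    · rw [if_neg h, ih]
      have hb : b[i]? = none := List.getElem?_eq_none (by omega)
      simp only [col, List.filterMap_cons, hb]

-- the outer append-fold is a map over range
theorem foldl_snoc_map (f : Nat → List Int) (l : List Nat) (acc : List (List Int)) :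
    l.foldl (fun tr i => tr ++ [f i]) acc = acc ++ l.map f := by
  induction l generalizing acc with
  | nil => simp
  | cons a l ih => simp [ih]

theorem portA_eq_map (blocks : List (List Int)) :
    transpose_blocks blocks
      = (List.range (((PySem.List.pyGet? blocks 0).getD []).length)).map (col blocks) := by
  unfold transpose_blocks
  simp only [foldl_col, List.nil_append]
  rw [foldl_snoc_map (col blocks)]
  simp

-- B side
theorem scatterBlock_length (n j : Nat) (b : List Int) (r : List (List Int)) :
    (scatterBlock n j b r).length = r.length := by
  induction b generalizing j r with
  | nil => rfl
  | cons x rest ih =>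
    simp only [scatterBlock]
    rw [ih]
    split <;> simp

theorem scatterBlock_getElem? (n : Nat) (k : Nat) (b : List Int) (j : Nat) (r : List (List Int))
    (hn : r.length = n) :
    (scatterBlock n j b r)[k]? =
      if j ≤ k ∧ k - j < b.length ∧ k < n then (r[k]?).map (· ++ [b.getD (k - j) 0])
      else r[k]? := by
  induction b generalizing j r with
  | nil =>
    simp only [scatterBlock, List.length_nil]
    rw [if_neg (by omega)]
  | cons x rest ih =>
    simp only [scatterBlock, List.length_cons]
    by_cases hjn : j < n
    · rw [if_pos hjn, ih (j + 1) _ (by simp [hn])]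
      by_cases hk : k = j
      · subst hk
        rw [if_neg (by omega), if_pos ⟨le_refl k, by omega, hjn⟩]
        have hkr : k < r.length := by omega
        simp [List.getElem?_eq_getElem hkr, List.getD]
      · have hmod2 : (r.modify j (· ++ [x]))[k]? = r[k]? := by
          rw [List.getElem?_modify]
          cases r[k]? <;> simp [Ne.symm hk]
        rw [hmod2]
        by_cases h2 : j + 1 ≤ k ∧ k - (j + 1) < rest.length ∧ k < n
        · rw [if_pos h2, if_pos (by omega)]
          have hkj : k - j = (k - (j + 1)) + 1 := by omega
          simp [hkj, List.getD]
        · rw [if_neg h2, if_neg (by omega)]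
    · rw [if_neg hjn, ih (j + 1) r hn]
      rw [if_neg (by omega), if_neg (by omega)]

theorem scatter_fold_length (n : Nat) (blocks : List (List Int)) (r : List (List Int)) :
    (blocks.foldl (fun r block => scatterBlock n 0 block r) r).length = r.length := by
  induction blocks generalizing r with
  | nil => rfl
  | cons b bs ih => simp only [List.foldl_cons]; rw [ih, scatterBlock_length]

theorem scatter_fold_getElem? (n : Nat) (blocks : List (List Int)) (r : List (List Int))
    (hn : r.length = n) (k : Nat) (hk : k < n) :
    (blocks.foldl (fun r block => scatterBlock n 0 block r) r)[k]? =
      (r[k]?).map (· ++ col blocks k) := by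
  induction blocks generalizing r with
  | nil =>
    simp only [List.foldl_nil, col, List.filterMap_nil]
    cases r[k]? <;> simp
  | cons b bs ih =>
    simp only [List.foldl_cons]
    rw [ih _ (by rw [scatterBlock_length]; exact hn)]
    rw [scatterBlock_getElem? n k b 0 r hn]
    by_cases h : k < b.length
    · rw [if_pos ⟨Nat.zero_le k, by omega, hk⟩]
      have hb : b[k]? = some (b.getD k 0) := by
        simp [List.getD, List.getElem?_eq_getElem h]
      cases hr : r[k]? <;>
        simp only [col, List.filterMap_cons, hb, Option.map_none, Option.map_some,
          List.append_assoc, List.singleton_append, Nat.sub_zero]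
    · rw [if_neg (by omega)]
      have hb : b[k]? = none := List.getElem?_eq_none (by omega)
      cases hr : r[k]? <;>
        simp only [col, List.filterMap_cons, hb, Option.map_none, Option.map_some]

theorem portB_eq_map (blocks : List (List Int)) :
    transpose_blocks_alt blocks
      = (List.range (((PySem.List.pyGet? blocks 0).getD []).length)).map (col blocks) := by
  unfold transpose_blocks_alt
  simp only []
  apply List.ext_getElem?
  intro k
  by_cases hk : k < ((PySem.List.pyGet? blocks 0).getD []).length
  · rw [scatter_fold_getElem? _ blocks _ (by simp) k hk]
    rw [List.getElem?_map, List.getElem?_range hk]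
    have : (List.replicate (((PySem.List.pyGet? blocks 0).getD []).length) ([] : List Int))[k]? = some [] := by
      simp [hk]
    simp [this]
  · rw [List.getElem?_eq_none, List.getElem?_eq_none]
    · simp; omega
    · rw [scatter_fold_length]; simp; omega

-- ===== VERDICT (by name: the statement is the Claim_ definition above) =====
theorem transpose_blocks_spec : Claim_equal_transpose_blocks := by
  intro blocks _ _
  unfold Spec_transpose_blocks
  rw [portA_eq_map, portB_eq_map]
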